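-- pv_equiv track=rewrite | github.com/STAR-RG/nl2spec | scripts/run_erase_language_event.py | resolve_method_logs
-- ===== SOURCE A (Python) =====
-- def resolve_method_logs(method_name, method_map, visiting=None, memo=None):
--     """
--     Recursively resolve logs from:
--       - direct logs in the method
--       - logs from helper methods called by this method
--     """
--     if memo is None:
--         memo = {}
--     if visiting is None:
--         visiting = set()
--
--     if method_name in memo:
--         return memo[method_name]
--
--     if method_name in visiting:
--         return []
--
--     if method_name not in method_map:
--         return []
--
--     visiting.add(method_name)
--
--     logs = []
--     method_info = method_map[method_name]
--
--     logs.extend(method_info["direct_logs"])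
--
--     for called_name in method_info["calls"]:
--         if called_name in method_map:
--             logs.extend(resolve_method_logs(called_name, method_map, visiting, memo))
--
--     visiting.remove(method_name)
--
--     deduped = []
--     seen = set()
--     for log_line in logs:
--         if log_line not in seen:
--             seen.add(log_line)
--             deduped.append(log_line)
--
--     memo[method_name] = deduped
--     return deduped
-- ===== SOURCE B (Python) =====
-- def resolve_method_logs(method_name, method_map, visiting=None, memo=None):
--     """Iterative re-implementation: explicit two-phase (enter/exit) stack DFS
--     instead of recursion; same memo/visiting bookkeeping, same return value."""
--     if memo is None:
--         memo = {}
--     if visiting is None: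
--         visiting = set()
--
--     if method_name in memo:
--         return memo[method_name]
--     if method_name in visiting or method_name not in method_map:
--         return []
--
--     stack = [("enter", method_name)]
--     while stack:
--         phase, name = stack.pop()
--         if phase == "enter":
--             if name in memo or name in visiting:
--                 continue
--             visiting.add(name)
--             stack.append(("exit", name))
--             for called in reversed(method_map[name]["calls"]):
--                 if called in method_map:
--                     stack.append(("enter", called))
--         else:
--             info = method_map[name]
--             logs = info["direct_logs"] + [line
--                                           for c in info["calls"] if c in method_map
--                                           for line in memo.get(c, [])]
--             memo[name] = list(dict.fromkeys(logs))
--             visiting.remove(name)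
--     return memo[method_name]
-- ===== Notes on version B (the rewrite author's own statement) =====
-- stated objective: alternative
-- what changed: Replaces A's recursive memoized DFS by an explicit two-phase (enter/exit) stack machine: an iterative while-loop over a frame stack that memoizes each method on its exit frame and assembles its logs from the memo entries of its callees instead of from recursive return values.
import Mathlib
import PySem

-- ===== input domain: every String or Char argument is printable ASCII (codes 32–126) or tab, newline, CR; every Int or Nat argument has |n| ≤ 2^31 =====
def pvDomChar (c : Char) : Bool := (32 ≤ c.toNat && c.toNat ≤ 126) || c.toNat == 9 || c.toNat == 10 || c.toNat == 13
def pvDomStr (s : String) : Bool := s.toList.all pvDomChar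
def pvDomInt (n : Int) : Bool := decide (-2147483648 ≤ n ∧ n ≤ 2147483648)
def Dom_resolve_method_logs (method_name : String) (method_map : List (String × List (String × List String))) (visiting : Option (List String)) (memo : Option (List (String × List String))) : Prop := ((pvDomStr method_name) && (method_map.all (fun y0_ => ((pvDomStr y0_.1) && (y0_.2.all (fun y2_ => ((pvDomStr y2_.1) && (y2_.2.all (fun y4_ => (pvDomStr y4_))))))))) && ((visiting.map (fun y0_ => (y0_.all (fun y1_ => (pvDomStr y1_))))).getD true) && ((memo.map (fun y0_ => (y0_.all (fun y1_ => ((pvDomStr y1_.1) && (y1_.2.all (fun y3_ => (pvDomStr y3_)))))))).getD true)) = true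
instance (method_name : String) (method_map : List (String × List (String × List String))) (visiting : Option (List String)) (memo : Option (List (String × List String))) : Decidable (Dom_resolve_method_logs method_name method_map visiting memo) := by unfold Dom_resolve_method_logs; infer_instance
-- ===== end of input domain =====

-- B replaces A's recursive memoized DFS by an explicit two-phase (enter/exit) stack machine —
-- same return value; equivalence is about the RETURN value only (both Pythons also mutate a
-- caller-supplied memo/visiting in the same way, but that is not claimed here).

-- Shared input-representation helpers (both Pythons read the same dicts the same way).
abbrev PVMMap := PySem.Dict String (List (String × List String))
abbrev PVMemo := PySem.Dict String (List String)

/-- `info["direct_logs"]` (total form; `Pre_` guarantees the key is present). -/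
def pvDirect (info : List (String × List String)) : List String :=
  ((PySem.Dict.ofList info).get? "direct_logs").getD []

/-- `info["calls"]` (total form; `Pre_` guarantees the key is present). -/
def pvCalls (info : List (String × List String)) : List String :=
  ((PySem.Dict.ofList info).get? "calls").getD []

-- Termination measure helpers (used only by the `decreasing_by` proofs of the ports).
/-- number of method_map entries whose key is not yet in `visiting`. -/
def pvFreshA (mm : PVMMap) (vis : PySem.Set String) : Nat :=
  (mm.items.filter (fun p => !(PySem.Set.contains vis p.1))).length

/-- number of method_map entries neither memoized nor in `visiting`. -/
def pvFreshB (mm : PVMMap) (vis : PySem.Set String) (memo : PVMemo) : Nat :=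
  (mm.items.filter (fun p => (PySem.Dict.get? memo p.1).isNone && !(PySem.Set.contains vis p.1))).length

/-- total number of call-sites listed in the map (bounds one stack expansion). -/
def pvTotalCalls (mm : PVMMap) : Nat :=
  (mm.items.map (fun p => (pvCalls p.2).length)).sum

theorem pvContains_iff (vis : PySem.Set String) (k : String) : PySem.Set.contains vis k = true ↔ k ∈ vis := by
  simp [PySem.Set.contains]
theorem pvMem_add (vis : PySem.Set String) (x k : String) : k ∈ PySem.Set.add vis x ↔ k ∈ vis ∨ k = x :=
  PySem.Set.mem_add vis x k

theorem pvFilter_length_le {α : Type} (l : List α) (p q : α → Bool)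
    (h : ∀ a ∈ l, q a = true → p a = true) :
    (l.filter q).length ≤ (l.filter p).length := by
  induction l with
  | nil => simp
  | cons a t ih =>
    have ht := ih (fun x hx => h x (List.mem_cons_of_mem a hx))
    simp only [List.filter_cons]
    by_cases hq : q a = true
    · rw [if_pos hq, if_pos (h a (List.mem_cons_self ..) hq)]
      simpa using ht
    · rw [if_neg hq]
      split
      · simp; omega
      · exact ht

theorem pvFilter_length_lt {α : Type} (l : List α) (p q : α → Bool)
    (h : ∀ a ∈ l, q a = true → p a = true)
    (a : α) (ha : a ∈ l) (hp : p a = true) (hq : q a = false) :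
    (l.filter q).length < (l.filter p).length := by
  induction l with
  | nil => cases ha
  | cons b t ih =>
    rcases List.mem_cons.1 ha with rfl | hat
    · have ht := pvFilter_length_le t p q (fun x hx => h x (List.mem_cons_of_mem a hx))
      simp only [List.filter_cons, hp, if_pos]
      rw [if_neg (by simp [hq])]
      simp; omega
    · have ht := ih (fun x hx => h x (List.mem_cons_of_mem b hx)) hat
      simp only [List.filter_cons]
      by_cases hqb : q b = true
      · rw [if_pos hqb, if_pos (h b (List.mem_cons_self ..) hqb)]
        simpa using ht
      · rw [if_neg hqb]
        split
        · simp; omega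
        · exact ht

theorem pvDict_get?_mem {ν : Type} (d : PySem.Dict String ν) (k : String) (v : ν)
    (h : d.get? k = some v) : (k, v) ∈ d.items := by
  simp only [PySem.Dict.get?, Option.map_eq_some_iff] at h
  obtain ⟨p, hp, hv⟩ := h
  have h1 := List.find?_some hp
  have h2 := List.mem_of_find?_eq_some hp
  obtain ⟨a, b⟩ := p
  simp only [beq_iff_eq] at h1
  subst h1; subst hv; exact h2

theorem pvFreshA_lt (mm : PVMMap) (vis : PySem.Set String) (name : String)
    (info : List (String × List String)) (hmm : mm.get? name = some info)
    (hvis : PySem.Set.contains vis name = false) :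
    pvFreshA mm (PySem.Set.add vis name) < pvFreshA mm vis := by
  have hnm : name ∉ vis := by
    intro hmem
    rw [(pvContains_iff vis name).2 hmem] at hvis
    cases hvis
  unfold pvFreshA
  refine pvFilter_length_lt _ _ _ ?_ (name, info) (pvDict_get?_mem _ _ _ hmm) ?_ ?_
  · intro a _ hq
    simp only [Bool.not_eq_true', ← Bool.not_eq_true, pvContains_iff] at hq ⊢
    intro hmem
    exact hq ((pvMem_add vis name a.1).2 (Or.inl hmem))
  · simp only [Bool.not_eq_true', ← Bool.not_eq_true, pvContains_iff]
    exact hnm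
  · simp

-- ===== PORT A =====  (literal transliteration of the recursive Python A;
-- memo/visiting threaded as values: `visiting.add`/`remove` around the child loop
-- becomes passing `vis.add name` to the children and returning to `vis` afterwards)

/-- A's hand-written dedup loop: `seen` set + `deduped` list, first occurrences kept. -/
def pvDedupA (logs : List String) : List String :=
  (logs.foldl
    (fun (st : PySem.Set String × List String) l =>
      if PySem.Set.contains st.1 l then st else (PySem.Set.add st.1 l, st.2 ++ [l]))
    ((PySem.Set.empty : PySem.Set String), ([] : List String))).2

mutual
  /-- body of Python A, returning (result, memo after the call). -/
  def pvGoA (mm : PVMMap) (name : String) (vis : PySem.Set String) (memo : PVMemo) :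
      List String × PVMemo :=
    match memo.get? name with
    | some v => (v, memo)                                  -- if method_name in memo
    | none =>
      if hv : PySem.Set.contains vis name then ([], memo)  -- if method_name in visiting
      else
        match hm : mm.get? name with
        | none => ([], memo)                               -- if method_name not in method_map
        | some info =>
          let st := pvGoCallsA mm (pvCalls info) (PySem.Set.add vis name) memo (pvDirect info)
          let ded := pvDedupA st.1
          (ded, st.2.insert name ded)                      -- memo[method_name] = deduped
  termination_by (pvFreshA mm vis, 0)
  decreasing_by
    exact Prod.Lex.left _ _ (pvFreshA_lt mm vis name info hm (by simpa using hv))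

  /-- the `for called_name in method_info["calls"]` loop of Python A. -/
  def pvGoCallsA (mm : PVMMap) (cs : List String) (vis : PySem.Set String) (memo : PVMemo)
      (logs : List String) : List String × PVMemo :=
    match cs with
    | [] => (logs, memo)
    | c :: rest =>
      if (mm.get? c).isSome then                            -- if called_name in method_map
        let r := pvGoA mm c vis memo
        pvGoCallsA mm rest vis r.2 (logs ++ r.1)            -- logs.extend(recursive result)
      else
        pvGoCallsA mm rest vis memo logs
  termination_by (pvFreshA mm vis, cs.length + 1)
  decreasing_by
    · exact Prod.Lex.right _ (by omega)
    · exact Prod.Lex.right _ (by simp only [List.length_cons]; omega)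
    · exact Prod.Lex.right _ (by simp only [List.length_cons]; omega)
end

def resolve_method_logs (method_name : String) (method_map : List (String × List (String × List String))) (visiting : Option (List String)) (memo : Option (List (String × List String))) : List String :=
  (pvGoA (PySem.Dict.ofList method_map) method_name
    (PySem.Set.ofList (visiting.getD []))
    (PySem.Dict.ofList (memo.getD []))).1

theorem pvFreshB_le_exit (mm : PVMMap) (vis : PySem.Set String) (memo : PVMemo) (n : String) (d : List String) :
    pvFreshB mm (PySem.Set.discard vis n) (memo.insert n d) ≤ pvFreshB mm vis memo := by
  unfold pvFreshB
  apply pvFilter_length_le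
  intro a _ hq
  simp only [Bool.and_eq_true, Bool.not_eq_true', Option.isNone_iff_eq_none] at hq ⊢
  obtain ⟨h1, h2⟩ := hq
  by_cases hne : a.1 = n
  · subst hne
    rw [PySem.Dict.get?_insert_self] at h1
    cases h1
  · rw [PySem.Dict.get?_insert_of_ne _ _ hne] at h1
    refine ⟨h1, ?_⟩
    rw [← Bool.not_eq_true, pvContains_iff] at h2 ⊢
    intro hmem
    exact h2 ((PySem.Set.mem_discard vis n a.1).2 ⟨hmem, hne⟩)

theorem pvFreshB_lt_enter (mm : PVMMap) (vis : PySem.Set String) (memo : PVMemo) (n : String)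
    (info : List (String × List String)) (hm : mm.get? n = some info)
    (h1 : memo.get? n = none) (h2 : PySem.Set.contains vis n = false) :
    pvFreshB mm (PySem.Set.add vis n) memo < pvFreshB mm vis memo := by
  unfold pvFreshB
  refine pvFilter_length_lt _ _ _ ?_ (n, info) (pvDict_get?_mem _ _ _ hm) ?_ ?_
  · intro a _ hq
    simp only [Bool.and_eq_true, Bool.not_eq_true'] at hq ⊢
    obtain ⟨ha1, ha2⟩ := hq
    refine ⟨ha1, ?_⟩
    rw [← Bool.not_eq_true, pvContains_iff] at ha2 ⊢
    intro hmem
    exact ha2 ((PySem.Set.mem_add vis n a.1).2 (Or.inl hmem))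
  · simp only [h1, Option.isNone_none, Bool.true_and, Bool.not_eq_true']
    exact h2
  · simp

theorem pvCalls_le_total (mm : PVMMap) (n : String) (info : List (String × List String))
    (hm : mm.get? n = some info) : (pvCalls info).length ≤ pvTotalCalls mm := by
  unfold pvTotalCalls
  exact List.single_le_sum (fun x _ => Nat.zero_le x) _
    (List.mem_map_of_mem (pvDict_get?_mem _ _ _ hm))

-- ===== PORT B =====  (literal transliteration of Source B's explicit stack machine)

inductive PVFrame : Type
  | enter : String → PVFrame
  | leave : String → PVFrame   -- the ("exit", name) frame
deriving DecidableEq, Repr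

/-- the `while stack:` loop of Source B; returns the final memo. -/
def pvRunB (mm : PVMMap) (stack : List PVFrame) (vis : PySem.Set String) (memo : PVMemo) :
    PVMemo :=
  match stack with
  | [] => memo
  | PVFrame.enter n :: rest =>
    if hskip : (memo.get? n).isSome || PySem.Set.contains vis n then
      pvRunB mm rest vis memo                                -- continue
    else
      match hm : mm.get? n with
      | none => pvRunB mm rest vis memo                      -- (unreachable when pushed; top-level guard)
      | some info =>
        -- push ("exit", n), then the in-map calls reversed; popping from the list head
        -- therefore visits the calls in order, then the exit frame
        pvRunB mm
          (((pvCalls info).filter (fun c => (mm.get? c).isSome)).map PVFrame.enter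
            ++ PVFrame.leave n :: rest)
          (PySem.Set.add vis n) memo
  | PVFrame.leave n :: rest =>
    let info := (mm.get? n).getD []
    let logs := pvDirect info
      ++ ((pvCalls info).filter (fun c => (mm.get? c).isSome)).flatMap
           (fun c => (memo.get? c).getD [])                  -- memo.get(c, [])
    pvRunB mm rest (PySem.Set.discard vis n)                 -- visiting.remove(name)
      (memo.insert n (PySem.List.dedup logs))                -- memo[name] = list(dict.fromkeys(logs))
  termination_by stack.length + (pvTotalCalls mm + 2) * pvFreshB mm vis memo
  decreasing_by
    · simp only [List.length_cons]; omega
    · simp only [List.length_cons]; omega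
    · simp only [Bool.or_eq_true, not_or, Bool.not_eq_true] at hskip
      obtain ⟨h1, h2⟩ := hskip
      have h1' : PySem.Dict.get? memo n = none := by
        cases hmo : PySem.Dict.get? memo n with
        | none => rfl
        | some v => rw [hmo] at h1; cases h1
      have hlt := pvFreshB_lt_enter mm vis memo n info hm h1' h2
      have hk := pvCalls_le_total mm n info hm
      have hmul : (pvTotalCalls mm + 2) * pvFreshB mm (PySem.Set.add vis n) memo + (pvTotalCalls mm + 2)
          ≤ (pvTotalCalls mm + 2) * pvFreshB mm vis memo := by
        calc (pvTotalCalls mm + 2) * pvFreshB mm (PySem.Set.add vis n) memo + (pvTotalCalls mm + 2)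
            = (pvTotalCalls mm + 2) * (pvFreshB mm (PySem.Set.add vis n) memo + 1) := by ring
          _ ≤ (pvTotalCalls mm + 2) * pvFreshB mm vis memo := Nat.mul_le_mul_left _ hlt
      simp only [List.length_append, List.length_map, List.length_cons]
      have hfl := List.length_filter_le (fun c => (PySem.Dict.get? mm c).isSome) (pvCalls info)
      omega
    · show rest.length + (pvTotalCalls mm + 2) *
          pvFreshB mm (PySem.Set.discard vis n) (PySem.Dict.insert memo n (PySem.List.dedup logs))
        < (PVFrame.leave n :: rest).length + (pvTotalCalls mm + 2) * pvFreshB mm vis memo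
      have hle := pvFreshB_le_exit mm vis memo n (PySem.List.dedup logs)
      have hmul := Nat.mul_le_mul_left (pvTotalCalls mm + 2) hle
      simp only [List.length_cons]
      omega

def resolve_method_logs_alt (method_name : String) (method_map : List (String × List (String × List String))) (visiting : Option (List String)) (memo : Option (List (String × List String))) : List String :=
  let mm : PVMMap := PySem.Dict.ofList method_map
  let memo0 : PVMemo := PySem.Dict.ofList (memo.getD [])
  let vis0 : PySem.Set String := PySem.Set.ofList (visiting.getD [])
  match memo0.get? method_name with
  | some v => v
  | none =>
    if PySem.Set.contains vis0 method_name || (mm.get? method_name).isNone then []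
    else ((pvRunB mm [PVFrame.enter method_name] vis0 memo0).get? method_name).getD []

-- ===== PRECONDITION & SPEC =====
/-- a method is expanded by A's DFS iff it is in the map and neither memoized nor in `visiting`. -/
def pvActive (method_map : List (String × List (String × List String))) (visiting : Option (List String)) (memo : Option (List (String × List String))) (n : String) : Bool :=
  ((PySem.Dict.ofList method_map).get? n).isSome
    && !((PySem.Dict.ofList (memo.getD [])).get? n).isSome
    && !(PySem.Set.contains (PySem.Set.ofList (visiting.getD [])) n)

/-- keys of the methods reachable from `method_name` along `calls` edges of expandable methods
(one closure step per map entry suffices: chains of distinct expandable methods are no longer). -/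
def pvReach (method_name : String) (method_map : List (String × List (String × List String))) (visiting : Option (List String)) (memo : Option (List (String × List String))) : List String :=
  (fun S => PySem.List.dedup (S ++ (S.filter (pvActive method_map visiting memo)).flatMap
      (fun n => pvCalls (((PySem.Dict.ofList method_map).get? n).getD []))))^[method_map.length]
    [method_name]

-- Pre_ excludes exactly the inputs on which Python A raises KeyError: those whose DFS reaches
-- (starting at method_name, through methods neither pre-memoized nor pre-marked visiting) a
-- method_map entry lacking a "direct_logs" or "calls" key.
def Pre_resolve_method_logs (method_name : String) (method_map : List (String × List (String × List String))) (visiting : Option (List String)) (memo : Option (List (String × List String))) : Prop :=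
  ∀ n ∈ pvReach method_name method_map visiting memo,
    pvActive method_map visiting memo n = true →
      "direct_logs" ∈ ((((PySem.Dict.ofList method_map).get? n).getD []).map Prod.fst)
      ∧ "calls" ∈ ((((PySem.Dict.ofList method_map).get? n).getD []).map Prod.fst)
instance (method_name : String) (method_map : List (String × List (String × List String))) (visiting : Option (List String)) (memo : Option (List (String × List String))) : Decidable (Pre_resolve_method_logs method_name method_map visiting memo) := by unfold Pre_resolve_method_logs; infer_instance

def pvWitness_resolve_method_logs : String × (List (String × List (String × List String))) × Option (List String) × (Option (List (String × List String))) :=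
  ("a", [("a", [("direct_logs", ["x", "y"]), ("calls", ["b", "a"])]),
         ("b", [("direct_logs", ["y"]), ("calls", [])])], none, none)

def Spec_resolve_method_logs (method_name : String) (method_map : List (String × List (String × List String))) (visiting : Option (List String)) (memo : Option (List (String × List String))) (out : List String) : Prop := out = resolve_method_logs_alt method_name method_map visiting memo
instance (method_name : String) (method_map : List (String × List (String × List String))) (visiting : Option (List String)) (memo : Option (List (String × List String))) (out : List String) : Decidable (Spec_resolve_method_logs method_name method_map visiting memo out) := by unfold Spec_resolve_method_logs; infer_instance

-- ===== CLAIM (what is proved, stated in full; the proofs are below) =====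
def Claim_equal_resolve_method_logs : Prop := ∀ (method_name : String) (method_map : List (String × List (String × List String))) (visiting : Option (List String)) (memo : Option (List (String × List String))), Dom_resolve_method_logs method_name method_map visiting memo → Pre_resolve_method_logs method_name method_map visiting memo → Spec_resolve_method_logs method_name method_map visiting memo (resolve_method_logs method_name method_map visiting memo)

-- ===== LEMMAS AND PROOFS =====

theorem pvDedupA_eq (xs : List String) : pvDedupA xs = PySem.List.dedup xs := by
  have h : ∀ (s : PySem.Set String),
      (xs.foldl (fun (st : PySem.Set String × List String) l =>
        if PySem.Set.contains st.1 l then st else (PySem.Set.add st.1 l, st.2 ++ [l])) (s, s)).2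
      = xs.foldl PySem.Set.add s := by
    induction xs with
    | nil => intro s; rfl
    | cons x t ih =>
      intro s
      by_cases hc : PySem.Set.contains s x
      · have hadd : PySem.Set.add s x = s := by simp only [PySem.Set.add, hc, if_pos]
        simp only [List.foldl_cons, hc, if_pos, hadd]
        exact ih s
      · have hadd : PySem.Set.add s x = s ++ [x] := by simp only [PySem.Set.add, hc, Bool.false_eq_true, if_false]
        simp only [List.foldl_cons, hc, hadd]
        rw [← hadd]
        exact ih (PySem.Set.add s x)
  unfold pvDedupA
  rw [show ((PySem.Set.empty : PySem.Set String), ([] : List String))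
        = (((PySem.Set.empty : PySem.Set String)), (PySem.Set.empty : PySem.Set String)) from rfl]
  rw [h PySem.Set.empty]
  rw [PySem.List.dedup_eq_ofList, PySem.Set.ofList_eq_foldl]
  rfl

theorem pvDiscard_add (vis : PySem.Set String) (n : String)
    (hv : PySem.Set.contains vis n = false) :
    PySem.Set.discard (PySem.Set.add vis n) n = vis := by
  have hnm : n ∉ vis := fun hmem => by rw [(pvContains_iff vis n).2 hmem] at hv; cases hv
  have hadd : PySem.Set.add vis n = vis ++ [n] := by simp only [PySem.Set.add, hv, Bool.false_eq_true, if_false]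
  rw [hadd]
  simp only [PySem.Set.discard, List.filter_append]
  rw [List.filter_eq_self.2 (fun y hy => by simp; exact fun h => hnm (h ▸ hy))]
  simp

theorem pvGoA_memo_some (mm : PVMMap) (name : String) (vis : PySem.Set String) (memo : PVMemo)
    (v : List String) (h : memo.get? name = some v) : pvGoA mm name vis memo = (v, memo) := by
  rw [pvGoA]
  simp [h]

theorem pvGoA_vis (mm : PVMMap) (name : String) (vis : PySem.Set String) (memo : PVMemo)
    (h : memo.get? name = none) (hv : PySem.Set.contains vis name = true) :
    pvGoA mm name vis memo = ([], memo) := by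
  rw [pvGoA]
  simp [h, (pvContains_iff vis name).1 hv]

theorem pvGoA_nomap (mm : PVMMap) (name : String) (vis : PySem.Set String) (memo : PVMemo)
    (h : memo.get? name = none) (hv : PySem.Set.contains vis name = false)
    (hm : mm.get? name = none) : pvGoA mm name vis memo = ([], memo) := by
  have hnm : name ∉ vis := fun hmem => by rw [(pvContains_iff vis name).2 hmem] at hv; cases hv
  rw [pvGoA]
  simp [h, hnm]
  split
  · rfl
  · next info heq => rw [hm] at heq; cases heq

theorem pvGoA_active (mm : PVMMap) (name : String) (vis : PySem.Set String) (memo : PVMemo)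
    (info : List (String × List String))
    (h : memo.get? name = none) (hv : PySem.Set.contains vis name = false)
    (hm : mm.get? name = some info) :
    pvGoA mm name vis memo =
      ((pvDedupA (pvGoCallsA mm (pvCalls info) (PySem.Set.add vis name) memo (pvDirect info)).1),
       (pvGoCallsA mm (pvCalls info) (PySem.Set.add vis name) memo (pvDirect info)).2.insert name
         (pvDedupA (pvGoCallsA mm (pvCalls info) (PySem.Set.add vis name) memo (pvDirect info)).1)) := by
  have hnm : name ∉ vis := fun hmem => by rw [(pvContains_iff vis name).2 hmem] at hv; cases hv
  have hadd : PySem.Set.add vis name = vis ++ [name] := by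
    simp only [PySem.Set.add, hv, Bool.false_eq_true, if_false]
  rw [pvGoA]
  simp [h, hnm]
  split
  · next heq => rw [hm] at heq; cases heq
  · next info' heq =>
      rw [hm] at heq
      injection heq with he
      subst he
      rfl

theorem pvGoCallsA_nil (mm : PVMMap) (vis : PySem.Set String) (memo : PVMemo) (logs : List String) :
    pvGoCallsA mm [] vis memo logs = (logs, memo) := by
  rw [pvGoCallsA]

theorem pvGoCallsA_cons_in (mm : PVMMap) (c : String) (rest : List String) (vis : PySem.Set String)
    (memo : PVMemo) (logs : List String) (hc : (mm.get? c).isSome = true) :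
    pvGoCallsA mm (c :: rest) vis memo logs
      = pvGoCallsA mm rest vis (pvGoA mm c vis memo).2 (logs ++ (pvGoA mm c vis memo).1) := by
  rw [pvGoCallsA]
  simp [hc]

theorem pvGoCallsA_cons_out (mm : PVMMap) (c : String) (rest : List String) (vis : PySem.Set String)
    (memo : PVMemo) (logs : List String) (hc : (mm.get? c).isSome = false) :
    pvGoCallsA mm (c :: rest) vis memo logs = pvGoCallsA mm rest vis memo logs := by
  rw [pvGoCallsA]
  simp [hc]

theorem pvRunB_nil (mm : PVMMap) (vis : PySem.Set String) (memo : PVMemo) :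
    pvRunB mm [] vis memo = memo := by
  rw [pvRunB]

theorem pvRunB_skip (mm : PVMMap) (n : String) (rest : List PVFrame) (vis : PySem.Set String)
    (memo : PVMemo) (h : (memo.get? n).isSome = true ∨ PySem.Set.contains vis n = true) :
    pvRunB mm (PVFrame.enter n :: rest) vis memo = pvRunB mm rest vis memo := by
  rw [pvRunB]
  rcases h with h | h
  · simp [h]
  · simp [(pvContains_iff vis n).1 h]

theorem pvRunB_nomap (mm : PVMMap) (n : String) (rest : List PVFrame) (vis : PySem.Set String)
    (memo : PVMemo) (h1 : memo.get? n = none) (h2 : PySem.Set.contains vis n = false)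
    (hm : mm.get? n = none) :
    pvRunB mm (PVFrame.enter n :: rest) vis memo = pvRunB mm rest vis memo := by
  have hnm : n ∉ vis := fun hmem => by rw [(pvContains_iff vis n).2 hmem] at h2; cases h2
  rw [pvRunB]
  simp [h1, hnm]
  split
  · rfl
  · next info heq => rw [hm] at heq; cases heq

theorem pvRunB_enter (mm : PVMMap) (n : String) (rest : List PVFrame) (vis : PySem.Set String)
    (memo : PVMemo) (info : List (String × List String)) (h1 : memo.get? n = none)
    (h2 : PySem.Set.contains vis n = false) (hm : mm.get? n = some info) :
    pvRunB mm (PVFrame.enter n :: rest) vis memo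
      = pvRunB mm (((pvCalls info).filter (fun c => (mm.get? c).isSome)).map PVFrame.enter
          ++ PVFrame.leave n :: rest) (PySem.Set.add vis n) memo := by
  have hnm : n ∉ vis := fun hmem => by rw [(pvContains_iff vis n).2 hmem] at h2; cases h2
  rw [pvRunB]
  simp [h1, hnm]
  split
  · next heq => rw [hm] at heq; cases heq
  · next info' heq =>
      rw [hm] at heq
      injection heq with he
      subst he
      rfl

theorem pvRunB_leave (mm : PVMMap) (n : String) (rest : List PVFrame) (vis : PySem.Set String)
    (memo : PVMemo) :
    pvRunB mm (PVFrame.leave n :: rest) vis memo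
      = pvRunB mm rest (PySem.Set.discard vis n)
          (memo.insert n (PySem.List.dedup (pvDirect ((mm.get? n).getD [])
            ++ ((pvCalls ((mm.get? n).getD [])).filter (fun c => (mm.get? c).isSome)).flatMap
                 (fun c => (memo.get? c).getD [])))) := by
  rw [pvRunB]

/-- All facts needed about one `pvGoA` call at a fixed `visiting` set:
(1) the stack machine consumes an `enter` frame exactly as `pvGoA` transforms the memo,
(2) the memo only grows, (3) entries of nodes still in `visiting` are untouched,
(4) a resolvable node ends up memoized with its result. -/
def PVBundleA (mm : PVMMap) (vis : PySem.Set String) : Prop :=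
  ∀ (name : String) (memo : PVMemo),
    (∀ st, pvRunB mm (PVFrame.enter name :: st) vis memo
        = pvRunB mm st vis (pvGoA mm name vis memo).2)
    ∧ (∀ k v, memo.get? k = some v → (pvGoA mm name vis memo).2.get? k = some v)
    ∧ (∀ k, PySem.Set.contains vis k = true → (pvGoA mm name vis memo).2.get? k = memo.get? k)
    ∧ (PySem.Set.contains vis name = false → (mm.get? name).isSome = true →
        (pvGoA mm name vis memo).2.get? name = some (pvGoA mm name vis memo).1)

theorem pvBundleCalls (mm : PVMMap) (vis : PySem.Set String) (hA : PVBundleA mm vis) :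
    ∀ (cs : List String) (memo : PVMemo) (logs : List String),
      (∀ st, pvRunB mm ((cs.filter (fun c => (PySem.Dict.get? mm c).isSome)).map PVFrame.enter ++ st) vis memo
          = pvRunB mm st vis (pvGoCallsA mm cs vis memo logs).2)
      ∧ (∀ k v, memo.get? k = some v → (pvGoCallsA mm cs vis memo logs).2.get? k = some v)
      ∧ (∀ k, PySem.Set.contains vis k = true →
          (pvGoCallsA mm cs vis memo logs).2.get? k = memo.get? k)
      ∧ ((pvGoCallsA mm cs vis memo logs).1
          = logs ++ (cs.filter (fun c => (PySem.Dict.get? mm c).isSome)).flatMap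
              (fun c => ((pvGoCallsA mm cs vis memo logs).2.get? c).getD [])) := by
  intro cs
  induction cs with
  | nil =>
    intro memo logs
    refine ⟨fun st => by rw [pvGoCallsA_nil]; simp, fun k v h => by rw [pvGoCallsA_nil]; exact h,
      fun k _ => by rw [pvGoCallsA_nil], by rw [pvGoCallsA_nil]; simp⟩
  | cons c rest IH =>
    intro memo logs
    cases hc : (PySem.Dict.get? mm c).isSome with
    | false =>
      have heq := pvGoCallsA_cons_out mm c rest vis memo logs hc
      have hf : (c :: rest).filter (fun c => (PySem.Dict.get? mm c).isSome)
          = rest.filter (fun c => (PySem.Dict.get? mm c).isSome) := by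
        simp [hc]
      obtain ⟨ia, ib, ic, ie⟩ := IH memo logs
      exact ⟨fun st => by rw [heq, hf]; exact ia st,
        fun k v h => by rw [heq]; exact ib k v h,
        fun k h => by rw [heq]; exact ic k h,
        by rw [heq, hf]; exact ie⟩
    | true =>
      have heq := pvGoCallsA_cons_in mm c rest vis memo logs hc
      have hf : (c :: rest).filter (fun c => (PySem.Dict.get? mm c).isSome)
          = c :: rest.filter (fun c => (PySem.Dict.get? mm c).isSome) := by
        simp [hc]
      obtain ⟨ha, hb, hcp, hd⟩ := hA c memo
      obtain ⟨ia, ib, ic, ie⟩ := IH (pvGoA mm c vis memo).2 (logs ++ (pvGoA mm c vis memo).1)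
      have hread : ((pvGoCallsA mm rest vis (pvGoA mm c vis memo).2
            (logs ++ (pvGoA mm c vis memo).1)).2.get? c).getD [] = (pvGoA mm c vis memo).1 := by
        cases hmo : PySem.Dict.get? memo c with
        | some v =>
          have hgo := pvGoA_memo_some mm c vis memo v hmo
          have h2 : (pvGoA mm c vis memo).2.get? c = some v := by rw [hgo]; exact hmo
          rw [ib c v h2, hgo]
          rfl
        | none =>
          cases hvb : PySem.Set.contains vis c with
          | true =>
            have hgo := pvGoA_vis mm c vis memo hmo hvb
            rw [ic c hvb, hgo]
            show (PySem.Dict.get? memo c).getD [] = ([] : List String)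
            rw [hmo]
            rfl
          | false =>
            have hd' := hd hvb hc
            rw [ib c _ hd']
            rfl
      refine ⟨?_, ?_, ?_, ?_⟩
      · intro st
        rw [heq, hf]
        simp only [List.map_cons, List.cons_append]
        rw [ha (((rest.filter (fun c => (PySem.Dict.get? mm c).isSome)).map PVFrame.enter) ++ st)]
        exact ia st
      · intro k v h
        rw [heq]
        exact ib k v (hb k v h)
      · intro k h
        rw [heq]
        exact (ic k h).trans (hcp k h)
      · rw [heq, hf]
        rw [ie]
        simp only [List.flatMap_cons, List.append_assoc]
        rw [hread]

theorem pvBundleA_all (mm : PVMMap) : ∀ (N : Nat) (vis : PySem.Set String),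
    pvFreshA mm vis ≤ N → PVBundleA mm vis := by
  intro N
  induction N using Nat.strong_induction_on with
  | _ N IH =>
    intro vis hN name memo
    cases hmo : PySem.Dict.get? memo name with
    | some v =>
      have hgo := pvGoA_memo_some mm name vis memo v hmo
      refine ⟨?_, ?_, ?_, ?_⟩
      · intro st
        rw [pvRunB_skip mm name st vis memo (Or.inl (by rw [hmo]; rfl)), hgo]
      · intro k v' h
        rw [hgo]; exact h
      · intro k _
        rw [hgo]
      · intro _ _
        rw [hgo]; exact hmo
    | none =>
      cases hvb : PySem.Set.contains vis name with
      | true =>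
        have hgo := pvGoA_vis mm name vis memo hmo hvb
        refine ⟨?_, ?_, ?_, ?_⟩
        · intro st
          rw [pvRunB_skip mm name st vis memo (Or.inr hvb), hgo]
        · intro k v' h
          rw [hgo]; exact h
        · intro k _
          rw [hgo]
        · intro hfalse _
          simp at hfalse
      | false =>
        cases hm : PySem.Dict.get? mm name with
        | none =>
          have hgo := pvGoA_nomap mm name vis memo hmo hvb hm
          refine ⟨?_, ?_, ?_, ?_⟩
          · intro st
            rw [pvRunB_nomap mm name st vis memo hmo hvb hm, hgo]
          · intro k v' h
            rw [hgo]; exact h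
          · intro k _
            rw [hgo]
          · intro _ hsome
            simp at hsome
        | some info =>
          have hgo := pvGoA_active mm name vis memo info hmo hvb hm
          have hlt := pvFreshA_lt mm vis name info hm hvb
          have hA' : PVBundleA mm (PySem.Set.add vis name) :=
            IH (pvFreshA mm (PySem.Set.add vis name)) (by omega)
              (PySem.Set.add vis name) le_rfl
          obtain ⟨ca, cb, cc, ce⟩ :=
            pvBundleCalls mm (PySem.Set.add vis name) hA' (pvCalls info) memo (pvDirect info)
          refine ⟨?_, ?_, ?_, ?_⟩
          · intro st
            rw [pvRunB_enter mm name st vis memo info hmo hvb hm]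
            rw [ca (PVFrame.leave name :: st)]
            rw [pvRunB_leave]
            rw [hm]
            simp only [Option.getD_some]
            rw [pvDiscard_add vis name hvb]
            rw [← ce, ← pvDedupA_eq, hgo]
          · intro k v hkv
            have hk : k ≠ name := fun he => by subst he; rw [hmo] at hkv; cases hkv
            rw [hgo, PySem.Dict.get?_insert_of_ne _ _ hk]
            exact cb k v hkv
          · intro k hk
            have hkn : k ≠ name := fun he => by subst he; rw [hk] at hvb; cases hvb
            rw [hgo, PySem.Dict.get?_insert_of_ne _ _ hkn]
            exact cc k ((pvContains_iff _ k).2 ((pvMem_add vis name k).2 (Or.inl ((pvContains_iff vis k).1 hk))))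
          · intro _ _
            rw [hgo]
            exact PySem.Dict.get?_insert_self _ _ _

-- ===== VERDICT (by name: the statement is the Claim_ definition above) =====
theorem resolve_method_logs_spec : Claim_equal_resolve_method_logs := by
  intro method_name method_map visiting memo _ _
  unfold Spec_resolve_method_logs resolve_method_logs resolve_method_logs_alt
  cases hq : PySem.Dict.get? (PySem.Dict.ofList (memo.getD [])) method_name with
  | some v =>
    rw [pvGoA_memo_some _ method_name _ _ v hq]
    simp [hq]
  | none =>
    cases hvb : PySem.Set.contains (PySem.Set.ofList (visiting.getD [])) method_name with
    | true =>
      rw [pvGoA_vis _ method_name _ _ hq hvb]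
      have hv' : method_name ∈ visiting.getD [] :=
        (PySem.Set.mem_ofList _ _).1 ((pvContains_iff _ method_name).1 hvb)
      simp [hq, hv']
    | false =>
      have hv' : method_name ∉ visiting.getD [] := by
        intro hmem
        rw [(pvContains_iff _ method_name).2 ((PySem.Set.mem_ofList _ _).2 hmem)] at hvb
        cases hvb
      cases hm : PySem.Dict.get? (PySem.Dict.ofList method_map) method_name with
      | none =>
        rw [pvGoA_nomap _ method_name _ _ hq hvb hm]
        simp [hq, hv', hm]
      | some info =>
        obtain ⟨ha, hb, hc, hd⟩ :=
          pvBundleA_all (PySem.Dict.ofList method_map)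
            (pvFreshA (PySem.Dict.ofList method_map) (PySem.Set.ofList (visiting.getD [])))
            (PySem.Set.ofList (visiting.getD [])) le_rfl method_name
            (PySem.Dict.ofList (memo.getD []))
        have h1 := ha []
        rw [pvRunB_nil] at h1
        have h2 := hd hvb (by rw [hm]; rfl)
        simp [hq, hv', hm, h1, h2]
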